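-- pv_equiv track=rewrite | github.com/slacgismo/loadinsight | pipelines/rbsa/tasks/group_sites.py | get_zipsitemapping
-- ===== SOURCE A (Python) =====
-- def get_zipsitemapping(all_sites, site_zip_map):
--     """
--     Creates new dict that maps 3 digit zipcodes to sites in zipcode
--     Currenly unused
--     """
--
--     zip_sitemap = {}
--
--     for site in all_sites:
--         zipcode = site_zip_map[site]
--         zipcode_3digit = zipcode[:3]
--
--         if zipcode_3digit in zip_sitemap.keys():
--             zip_sitemap[zipcode_3digit].append(site)
--         else:
--             zip_sitemap[zipcode_3digit] = [site]
--
--     return zip_sitemap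
-- ===== SOURCE B (Python) =====
-- def get_zipsitemapping(all_sites, site_zip_map):
--     """
--     Creates new dict that maps 3 digit zipcodes to sites in zipcode
--     (two-pass re-implementation: collect the distinct prefixes first,
--     then build each group by filtering all_sites)
--     """
--     key = lambda site: site_zip_map[site][:3]
--     prefixes = list(dict.fromkeys(key(site) for site in all_sites))
--     return {p: [site for site in all_sites if key(site) == p] for p in prefixes}
-- ===== Notes on version B (the rewrite author's own statement) =====
-- stated objective: alternative
-- what changed: Replaces the single-pass dict-of-lists mutation with a two-pass scheme: first dedupe the 3-digit prefixes in order of first occurrence (dict.fromkeys), then build each group by filtering all_sites, via a dict comprehension.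
import Mathlib
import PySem

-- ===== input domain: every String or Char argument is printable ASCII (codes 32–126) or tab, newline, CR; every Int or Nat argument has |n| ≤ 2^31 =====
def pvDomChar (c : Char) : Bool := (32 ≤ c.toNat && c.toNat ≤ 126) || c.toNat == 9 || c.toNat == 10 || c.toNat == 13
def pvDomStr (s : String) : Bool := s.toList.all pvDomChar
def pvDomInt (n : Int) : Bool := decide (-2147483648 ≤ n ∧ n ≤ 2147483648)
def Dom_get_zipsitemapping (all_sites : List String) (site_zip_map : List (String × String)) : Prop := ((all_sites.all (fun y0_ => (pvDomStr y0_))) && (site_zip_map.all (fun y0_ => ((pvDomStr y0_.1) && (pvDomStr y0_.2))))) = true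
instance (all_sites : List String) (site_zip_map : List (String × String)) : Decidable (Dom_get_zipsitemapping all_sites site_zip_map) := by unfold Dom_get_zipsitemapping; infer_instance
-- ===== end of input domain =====

-- B replaces A's single-pass dict-of-lists mutation with a two-pass scheme (dedupe prefixes, then filter each group); alternative decomposition, same return value.


-- ===== PORT A =====
-- site_zip_map[site][:3]; the `.getD ""` is only reached outside Pre_ (KeyError in Python)
def pvKey (site_zip_map : List (String × String)) (site : String) : String :=
  PySem.Str.slice (((PySem.Dict.ofList site_zip_map).get? site).getD "") none (some 3)

def get_zipsitemapping (all_sites : List String) (site_zip_map : List (String × String)) : List (String × List String) :=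
  (all_sites.foldl (fun (zip_sitemap : PySem.Dict String (List String)) site =>
      let zipcode_3digit := pvKey site_zip_map site
      if zip_sitemap.contains zipcode_3digit then
        zip_sitemap.modify zipcode_3digit [] (fun l => l ++ [site])   -- zip_sitemap[z3].append(site)
      else
        zip_sitemap.insert zipcode_3digit [site]) PySem.Dict.empty).items

-- ===== PORT B =====
def get_zipsitemapping_alt (all_sites : List String) (site_zip_map : List (String × String)) : List (String × List String) :=
  let prefixes := PySem.List.dedup (all_sites.map (pvKey site_zip_map))   -- list(dict.fromkeys(...))
  prefixes.map (fun p => (p, all_sites.filter (fun site => pvKey site_zip_map site == p)))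

-- ===== PRECONDITION & SPEC =====
-- Pre_ excludes exactly the inputs where A raises KeyError: a site not present as a key of site_zip_map (B raises there too).
def Pre_get_zipsitemapping (all_sites : List String) (site_zip_map : List (String × String)) : Prop :=
  ∀ site ∈ all_sites, (PySem.Dict.ofList site_zip_map).contains site = true
instance (all_sites : List String) (site_zip_map : List (String × String)) : Decidable (Pre_get_zipsitemapping all_sites site_zip_map) := by unfold Pre_get_zipsitemapping; infer_instance
def pvWitness_get_zipsitemapping : List String × (List (String × String)) :=
  (["s1", "s2", "s3"], [("s1", "97301"), ("s2", "97302"), ("s3", "98101")])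

def Spec_get_zipsitemapping (all_sites : List String) (site_zip_map : List (String × String)) (out : List (String × List String)) : Prop := out = get_zipsitemapping_alt all_sites site_zip_map
instance (all_sites : List String) (site_zip_map : List (String × String)) (out : List (String × List String)) : Decidable (Spec_get_zipsitemapping all_sites site_zip_map out) := by unfold Spec_get_zipsitemapping; infer_instance

-- ===== CLAIM (what is proved, stated in full; the proofs are below) =====
def Claim_equal_get_zipsitemapping : Prop := ∀ (all_sites : List String) (site_zip_map : List (String × String)), Dom_get_zipsitemapping all_sites site_zip_map → Pre_get_zipsitemapping all_sites site_zip_map → Spec_get_zipsitemapping all_sites site_zip_map (get_zipsitemapping all_sites site_zip_map)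

-- ===== LEMMAS AND PROOFS =====

-- first pair found in a keyed map is the key with its image
theorem pv_find_map_eq {α β : Type} [BEq α] [LawfulBEq α] (f : α → β) (z : α) :
    ∀ (ps : List α), z ∈ ps →
      (ps.map (fun p => (p, f p))).find? (fun pr => pr.1 == z) = some (z, f z) := by
  intro ps hz
  induction ps with
  | nil => cases hz
  | cons p ps ih =>
    by_cases h : p = z
    · subst h; simp
    · have : z ∈ ps := by
        rcases List.mem_cons.mp hz with h' | h'
        · exact absurd h'.symm h
        · exact h'
      simpa [List.find?, beq_eq_false_iff_ne.mpr h] using ih this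

-- the grouping invariant: A's fold over l, as an items list, is B's two-pass form
theorem pv_group_invariant (key : String → String) (l : List String) :
    (l.foldl (fun (d : PySem.Dict String (List String)) site =>
        let z := key site
        if d.contains z then d.modify z [] (fun v => v ++ [site]) else d.insert z [site])
      PySem.Dict.empty).items
    = (PySem.List.dedup (l.map key)).map
        (fun p => (p, l.filter (fun site => key site == p))) := by
  induction l using List.reverseRecOn with
  | nil => rfl
  | append_singleton l x ih =>
    rw [List.foldl_append]
    set D := l.foldl (fun (d : PySem.Dict String (List String)) site =>
        let z := key site
        if d.contains z then d.modify z [] (fun v => v ++ [site]) else d.insert z [site])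
      PySem.Dict.empty with hD
    have hdedup : PySem.List.dedup (l.map key ++ [key x])
        = PySem.Set.add (PySem.List.dedup (l.map key)) (key x) := by
      simp [PySem.List.dedup, PySem.Set.ofList, List.foldl_append]
    have hciff : D.contains (key x) = true ↔ key x ∈ l.map key := by
      constructor
      · intro h
        simp only [PySem.Dict.contains, ih, List.any_map, List.any_eq_true,
          Function.comp, beq_iff_eq] at h
        obtain ⟨p, hp, hpe⟩ := h
        exact hpe ▸ (PySem.Set.mem_ofList _ _).mp hp
      · intro h
        simp only [PySem.Dict.contains, ih, List.any_map, List.any_eq_true,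
          Function.comp, beq_iff_eq]
        exact ⟨key x, (PySem.Set.mem_ofList _ _).mpr h, rfl⟩
    by_cases hmem : key x ∈ l.map key
    · -- the prefix already has a group: modify appends x in place
      have hc : D.contains (key x) = true := hciff.mpr hmem
      have hmemD : key x ∈ PySem.List.dedup (l.map key) := (PySem.Set.mem_ofList _ _).mpr hmem
      have hget : D.getD (key x) [] = l.filter (fun site => key site == key x) := by
        simp only [PySem.Dict.getD, PySem.Dict.get?, ih,
          pv_find_map_eq (fun p => l.filter (fun site => key site == p)) (key x) _ hmemD]
        rfl
      have haddmem : PySem.Set.add (PySem.List.dedup (l.map key)) (key x)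
          = PySem.List.dedup (l.map key) := by
        simp only [PySem.Set.add]
        rw [if_pos ((PySem.Set.contains_iff _ _).mpr hmemD)]
      rw [List.foldl_cons, List.foldl_nil]
      simp only [List.map_append, List.map_cons, List.map_nil, hdedup, haddmem]
      simp only [if_true, PySem.Dict.modify, PySem.Dict.insert, hc, hget, ih, List.map_map]
      apply List.map_congr_left
      intro p _
      by_cases hp : p = key x
      · subst hp
        simp [List.filter_append]
      · have h1 : (p == key x) = false := beq_eq_false_iff_ne.mpr hp
        have h2 : (key x == p) = false := beq_eq_false_iff_ne.mpr (Ne.symm hp)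
        simp [Function.comp, h1, h2, List.filter_append]
    · -- new prefix: insert appends a fresh singleton group at the end
      have hc : D.contains (key x) = false :=
        Bool.eq_false_iff.mpr (fun h => hmem (hciff.mp h))
      have hadd : PySem.Set.add (PySem.List.dedup (l.map key)) (key x)
          = PySem.List.dedup (l.map key) ++ [key x] := by
        simp only [PySem.Set.add]
        rw [if_neg]
        intro h
        exact hmem ((PySem.Set.mem_ofList _ _).mp ((PySem.Set.contains_iff _ _).mp h))
      have hfilternil : l.filter (fun site => key site == key x) = [] := by
        apply List.filter_eq_nil_iff.mpr
        intro s hs h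
        exact hmem (by
          have : key s = key x := by simpa using h
          exact this ▸ List.mem_map_of_mem hs)
      rw [List.foldl_cons, List.foldl_nil]
      simp only [List.map_append, List.map_cons, List.map_nil, hdedup, hadd]
      simp only [Bool.false_eq_true, if_false, PySem.Dict.insert, hc, ih, List.map_map]
      congr 1
      · apply List.map_congr_left
        intro p hp
        have hpne : p ≠ key x := by
          intro h; subst h
          exact hmem ((PySem.Set.mem_ofList _ _).mp hp)
        simp [List.filter_append]
        exact Ne.symm hpne
      · simp [List.filter_append, hfilternil]

-- ===== VERDICT (by name: the statement is the Claim_ definition above) =====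
theorem get_zipsitemapping_spec : Claim_equal_get_zipsitemapping := by
  intro all_sites site_zip_map _ _
  show get_zipsitemapping all_sites site_zip_map = get_zipsitemapping_alt all_sites site_zip_map
  unfold get_zipsitemapping get_zipsitemapping_alt
  exact pv_group_invariant (pvKey site_zip_map) all_sites
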